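-- pv_equiv track=rewrite | github.com/heehoonhong/Algorithm | 프로그래머스/2/388352. 비밀 코드 해독/비밀 코드 해독.py | solution
-- ===== SOURCE A (Python) =====
-- from itertools import combinations
--
-- def solution(n, q, ans):
--     r=len(q[0])
--     lst=list(range(1,n+1))
--     result=0
--
--     for element in combinations(lst,r):
--         temp_ans=[]
--         element=list(element)
--         for i in range(len(q)):
--             cnt=0
--             for j in range(len(q[0])):
--                 if q[i][j] in element:
--                     cnt+=1
--             temp_ans.append(cnt)
--         if temp_ans==ans: result+=1
--     return result
-- ===== SOURCE B (Python) =====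
-- def solution(n, q, ans):
--     # DFS over values 1..n with incremental per-query overlap counts and pruning;
--     # the exclude-chain is iterative so recursion depth is bounded by r.
--     r = len(q[0])
--     mults = [[row[:r].count(v) for row in q] for v in range(1, n + 1)]
--     m = len(q)
--
--     def dfs(idx, need, counts):
--         total = 0
--         while True:
--             if need > len(mults) - idx:
--                 return total
--             if any(c > t for c, t in zip(counts, ans)):
--                 return total
--             if idx == len(mults):
--                 return total + (1 if need == 0 and counts == list(ans) else 0)
--             if need > 0:
--                 total += dfs(idx + 1, need - 1,
--                              [c + d for c, d in zip(counts, mults[idx])])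
--             idx += 1
--
--     return dfs(0, r, [0] * m)
-- ===== Notes on version B (the rewrite author's own statement) =====
-- stated objective: alternative
-- what changed: A enumerates all C(n,r) combinations and recounts every query from scratch for each candidate; B precomputes per-value multiplicity vectors for each query and runs an include/exclude DFS over the values 1..n that maintains the per-query overlap counts incrementally, pruning branches whose counts already exceed ans or that cannot reach r chosen values; Pre_ excludes exactly the inputs on which A raises IndexError (empty q, or a row shorter than q[0] when len(q[0]) <= n).
import Mathlib
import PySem

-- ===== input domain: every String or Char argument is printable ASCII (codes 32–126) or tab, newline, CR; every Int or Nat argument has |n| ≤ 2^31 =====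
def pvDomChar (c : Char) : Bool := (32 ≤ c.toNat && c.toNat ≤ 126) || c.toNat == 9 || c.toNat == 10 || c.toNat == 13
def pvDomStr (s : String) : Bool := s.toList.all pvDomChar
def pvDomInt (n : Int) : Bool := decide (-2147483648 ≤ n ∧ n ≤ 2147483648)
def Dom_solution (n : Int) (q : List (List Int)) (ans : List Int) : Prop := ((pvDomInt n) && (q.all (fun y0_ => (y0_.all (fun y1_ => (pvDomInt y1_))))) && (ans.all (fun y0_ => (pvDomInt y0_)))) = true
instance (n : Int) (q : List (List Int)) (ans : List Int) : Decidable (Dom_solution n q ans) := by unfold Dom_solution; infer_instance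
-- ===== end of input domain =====

-- B replaces A's exhaustive scan of all C(n,r) combinations (re-counting every query from
-- scratch per candidate) by an include/exclude DFS over the values 1..n that maintains the
-- per-query overlap counts incrementally and prunes dead branches; equivalence of the
-- RETURN VALUES is proved on Pre_ (q nonempty, no row shorter than q[0]).

-- ===== PORT A =====
def solution (n : Int) (q : List (List Int)) (ans : List Int) : Int :=
  let r := (q.headD []).length
  let lst := PySem.List.pyRange 1 (n + 1)
  (PySem.List.combinations lst r).foldl
    (fun result element =>
      let temp_ans :=
        (PySem.List.pyRange 0 (q.length : Int)).foldl
          (fun temp i =>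
            temp ++ [(PySem.List.pyRange 0 (r : Int)).foldl
              (fun cnt j =>
                if element.contains (PySem.List.pyGetD (PySem.List.pyGetD q i []) j 0)
                then cnt + 1 else cnt) (0 : Int)])
          []
      if temp_ans = ans then result + 1 else result)
    0

-- ===== PORT B =====
-- DFS over the precomputed per-value multiplicity vectors (Source B's dfs).
def dfsB (ans : List Int) : List (List Int) → Int → List Int → Int → Int
  | mults, need, counts, total =>
    if (mults.length : Int) < need then total
    else if (counts.zip ans).any (fun p => decide (p.1 > p.2)) then total
    else
      match mults with
      | [] => total + (if need = 0 ∧ counts = ans then 1 else 0)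
      | vec :: rest =>
          dfsB ans rest need counts
            (total +
              if 0 < need then
                dfsB ans rest (need - 1) ((counts.zip vec).map (fun p => p.1 + p.2)) 0
              else 0)

def solution_alt (n : Int) (q : List (List Int)) (ans : List Int) : Int :=
  let r := (q.headD []).length
  let mults := (PySem.List.pyRange 1 (n + 1)).map
    (fun v => q.map (fun row =>
      ((PySem.List.count (PySem.List.slice row none (some (r : Int))) v : Nat) : Int)))
  dfsB ans mults (r : Int) (List.replicate q.length 0) 0

-- ===== PRECONDITION & SPEC =====
-- Pre_ excludes exactly the inputs on which A raises IndexError: empty q, and q having a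
-- row shorter than q[0] while len(q[0]) ≤ n (so at least one candidate combination is built).
def Pre_solution (n : Int) (q : List (List Int)) (ans : List Int) : Prop :=
  q ≠ [] ∧ ((((q.headD []).length : Nat) : Int) ≤ n → ∀ row ∈ q, (q.headD []).length ≤ row.length)
instance (n : Int) (q : List (List Int)) (ans : List Int) : Decidable (Pre_solution n q ans) := by
  unfold Pre_solution; infer_instance
def pvWitness_solution : Int × List (List Int) × List Int := (2, [[1, 2]], [1])

def Spec_solution (n : Int) (q : List (List Int)) (ans : List Int) (out : Int) : Prop :=
  out = solution_alt n q ans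
instance (n : Int) (q : List (List Int)) (ans : List Int) (out : Int) :
    Decidable (Spec_solution n q ans out) := by unfold Spec_solution; infer_instance

-- ===== CLAIM (what is proved, stated in full; the proofs are below) =====
def Claim_equal_solution : Prop := ∀ (n : Int) (q : List (List Int)) (ans : List Int),
  Dom_solution n q ans → Pre_solution n q ans → Spec_solution n q ans (solution n q ans)

-- ===== LEMMAS AND PROOFS =====

-- take r row enumerated by index (r in range)
lemma take_eq_map_range (row : List Int) (r : Nat) (h : r ≤ row.length) :
    row.take r = (List.range r).map (fun j => row.getD j 0) := by
  apply List.ext_getElem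
  · simp [h]
  · intro i h1 h2
    simp at h2
    simp [List.getElem_take, List.getElem?_eq_getElem (lt_of_lt_of_le h2 h)]

-- membership count against a duplicate-free selection = sum of per-value multiplicities
lemma countP_mem_cons (v : Int) (S : List Int) (hv : v ∉ S) (t : List Int) :
    t.countP (fun x => decide (x ∈ v :: S)) = t.count v + t.countP (fun x => decide (x ∈ S)) := by
  induction t with
  | nil => simp
  | cons x t ih =>
    have h1 : (decide (x ∈ v :: S) : Bool) = (decide (x = v) || decide (x ∈ S)) := by
      simp [List.mem_cons]
    simp only [List.countP_cons, List.count_cons, ih, h1]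
    by_cases hx : x = v
    · subst hx
      have hxS : x ∉ S := hv
      simp [hxS]
      omega
    · by_cases hxS : x ∈ S <;> simp [hx, hxS] <;> omega

lemma countP_mem_eq_sum' (S : List Int) (hS : S.Nodup) (t : List Int) :
    ((t.countP (fun x => decide (x ∈ S)) : Nat) : Int)
      = (S.map (fun v => ((t.count v : Nat) : Int))).sum := by
  induction S with
  | nil => simp
  | cons v S ih =>
    rcases List.nodup_cons.mp hS with ⟨hv, hS'⟩
    rw [countP_mem_cons v S hv t]
    push_cast
    rw [ih hS']
    simp

lemma countP_mem_eq_sum (S : List Int) (hS : S.Nodup) (t : List Int) :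
    ((t.countP (fun x => S.contains x) : Nat) : Int)
      = (S.map (fun v => ((t.count v : Nat) : Int))).sum := by
  have hc : t.countP (fun x => S.contains x) = t.countP (fun x => decide (x ∈ S)) := by
    apply List.countP_congr; intro x _; simp
  rw [hc, countP_mem_eq_sum' S hS t]

-- a selection's multiplicity sums are nonnegative
lemma sum_counts_nonneg (S : List Int) (t : List Int) :
    0 ≤ (S.map (fun v => ((t.count v : Nat) : Int))).sum := by
  apply List.sum_nonneg
  intro x hx
  rcases List.mem_map.mp hx with ⟨v, _, rfl⟩
  positivity

-- if some running count already exceeds ans, no completion can reach ans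
lemma pred_false_of_exceed (q : List (List Int)) (ans : List Int) (F : List Int → Int)
    (g : List Int → Int) (hg : ∀ row, 0 ≤ g row)
    (h : ((q.map F).zip ans).any (fun p => decide (p.1 > p.2)) = true) :
    ¬ (q.map (fun row => F row + g row) = ans) := by
  intro heq
  rcases List.any_eq_true.mp h with ⟨p, hp, hgt⟩
  rcases List.mem_iff_getElem.mp hp with ⟨i, hi, hpi⟩
  have hiF : i < (q.map F).length := lt_of_lt_of_le hi (by simp [List.length_zip])
  have hia : i < ans.length := lt_of_lt_of_le hi (by simp [List.length_zip])
  have hpz : ((q.map F).zip ans)[i] = ((q.map F)[i], ans[i]) := List.getElem_zip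
  rw [hpz] at hpi
  subst hpi
  simp only [decide_eq_true_eq] at hgt
  have hiq : i < q.length := by simpa using hiF
  have h1 : (q.map F)[i] = F q[i] := by simp
  have h2 : (q.map (fun row => F row + g row))[i]'(by simpa using hiq) = F q[i] + g q[i] := by simp
  have h3 : (q.map (fun row => F row + g row))[i]'(by simpa using hiq) = ans[i] :=
    List.getElem_of_eq heq (by simpa using hiq)
  have := hg q[i]
  rw [h1] at hgt
  omega

-- the DFS over the multiplicity vectors of vals counts exactly the matching combinations
lemma dfsB_eq (q : List (List Int)) (ans : List Int) (r : Nat) :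
    ∀ (vals : List Int) (k : Nat) (F : List Int → Int) (total : Int),
    dfsB ans (vals.map (fun v => q.map (fun row => (((row.take r).count v : Nat) : Int))))
        (k : Int) (q.map F) total
      = total + (((PySem.List.combinations vals k).countP
          (fun S => decide (q.map (fun row =>
            F row + (S.map (fun v => (((row.take r).count v : Nat) : Int))).sum) = ans)) : Nat) : Int) := by
  intro vals
  induction vals with
  | nil =>
    intro k F total
    rw [dfsB.eq_def]
    cases k with
    | zero =>
      simp only [List.map_nil, List.length_nil, Nat.cast_zero, PySem.List.combinations_zero,
        lt_self_iff_false, if_false]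
      by_cases h2 : ((q.map F).zip ans).any (fun p => decide (p.1 > p.2)) = true
      · rw [if_pos h2]
        have hne := pred_false_of_exceed q ans F
          (fun row => (([] : List Int).map (fun v => (((row.take r).count v : Nat) : Int))).sum)
          (fun row => sum_counts_nonneg [] (row.take r)) h2
        simp at hne
        simp [hne]
      · rw [if_neg h2]
        by_cases h3 : q.map F = ans <;> simp [h3]
    | succ k' =>
      have h1 : ((0 : Nat) : Int) < ((k' + 1 : Nat) : Int) := by push_cast; omega
      simp only [List.map_nil, List.length_nil, Nat.cast_zero] at h1 ⊢
      rw [if_pos h1, PySem.List.combinations_nil_succ]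
      simp
  | cons v vs ih =>
    intro k F total
    rw [dfsB.eq_def]
    simp only [List.map_cons, List.length_cons, List.length_map]
    by_cases h1 : (((vs.length : Nat) : Int) + 1 < (k : Int))
    · rw [if_pos (by push_cast at h1 ⊢; omega)]
      have hlen : (v :: vs).length < k := by
        simp only [List.length_cons]
        exact_mod_cast (by push_cast at h1 ⊢; omega : ((vs.length + 1 : Nat) : Int) < (k : Int))
      rw [PySem.List.combinations_eq_nil_of_length_lt (v :: vs) hlen]
      simp
    · rw [if_neg (by push_cast at h1 ⊢; omega)]
      by_cases h2 : ((q.map F).zip ans).any (fun p => decide (p.1 > p.2)) = true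
      · rw [if_pos h2]
        have hz : (PySem.List.combinations (v :: vs) k).countP
            (fun S => decide (q.map (fun row =>
              F row + (S.map (fun v => (((row.take r).count v : Nat) : Int))).sum) = ans)) = 0 := by
          apply List.countP_eq_zero.mpr
          intro S _
          have hne := pred_false_of_exceed q ans F
            (fun row => (S.map (fun v => (((row.take r).count v : Nat) : Int))).sum)
            (fun row => sum_counts_nonneg S (row.take r)) h2
          simpa using hne
        simp [hz]
      · rw [if_neg h2]
        show dfsB ans (vs.map _) (k : Int) (q.map F)
            (total +
              if 0 < (k : Int) then
                dfsB ans (vs.map _) ((k : Int) - 1)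
                  (((q.map F).zip (q.map (fun row => (((row.take r).count v : Nat) : Int)))).map
                    (fun p => p.1 + p.2)) 0
              else 0) = _
        cases k with
        | zero =>
          rw [if_neg (by norm_num), add_zero, ih 0 F total]
          rw [PySem.List.combinations_zero, PySem.List.combinations_zero]
        | succ k' =>
          rw [if_pos (by push_cast; omega)]
          have hz : ((q.map F).zip (q.map (fun row => (((row.take r).count v : Nat) : Int)))).map
              (fun p => p.1 + p.2)
              = q.map (fun row => F row + (((row.take r).count v : Nat) : Int)) := by
            rw [List.zip_map', List.map_map]
            rfl
          have hk : ((k' + 1 : Nat) : Int) - 1 = (k' : Int) := by push_cast; ring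
          rw [hz, hk, ih k' (fun row => F row + (((row.take r).count v : Nat) : Int)) 0,
            ih (k' + 1) F]
          rw [PySem.List.combinations_cons_succ, List.countP_append, List.countP_map]
          have hp : ((fun S => decide (q.map (fun row =>
                F row + (S.map (fun v => (((row.take r).count v : Nat) : Int))).sum) = ans)) ∘
                (fun c => v :: c))
              = (fun S => decide (q.map (fun row =>
                (F row + (((row.take r).count v : Nat) : Int)) +
                  (S.map (fun v => (((row.take r).count v : Nat) : Int))).sum) = ans)) := by
            funext S
            simp only [Function.comp_apply, List.map_cons, List.sum_cons]
            have hf : (fun row : List Int => F row +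
                  ((((row.take r).count v : Nat) : Int) +
                    (S.map (fun u => (((row.take r).count u : Nat) : Int))).sum))
                = (fun row : List Int => (F row + (((row.take r).count v : Nat) : Int)) +
                    (S.map (fun u => (((row.take r).count u : Nat) : Int))).sum) :=
              funext fun row => by ring
            rw [decide_eq_decide, hf]
          rw [hp]
          push_cast
          ring

-- A's inner positional-membership loop equals B's per-value multiplicity sum
lemma innerA_eq (r : Nat) (S row : List Int) (hS : S.Nodup) (h : r ≤ row.length) :
    (PySem.List.pyRange 0 (r : Int)).foldl
      (fun cnt j => if S.contains (PySem.List.pyGetD row j 0) then cnt + 1 else cnt) (0 : Int)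
    = (S.map (fun v => (((row.take r).count v : Nat) : Int))).sum := by
  rw [PySem.List.pyRange_zero_natCast, List.foldl_map]
  simp only [PySem.List.pyGetD_natCast]
  rw [PySem.List.foldl_if_add_one, ← countP_mem_eq_sum S hS (row.take r),
    take_eq_map_range row r h, List.countP_map]
  simp [Function.comp_def]

-- ===== VERDICT (by name: the statement is the Claim_ definition above) =====
theorem solution_spec : Claim_equal_solution := by
  intro n q ans _ hPre
  obtain ⟨hq, himp⟩ := hPre
  unfold Spec_solution
  by_cases hlen' : ∀ row ∈ q, (q.headD []).length ≤ row.length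
  case neg =>
    -- here len(q[0]) > n: no candidate combination exists and both programs yield 0
    have hrn : ¬((((q.headD []).length : Nat) : Int) ≤ n) := fun h => hlen' (himp h)
    have hr1 : 1 ≤ (q.headD []).length := by
      by_contra h
      exact hlen' (fun row _ => by omega)
    have hlt : (PySem.List.pyRange 1 (n + 1)).length < (q.headD []).length := by
      rw [PySem.List.length_pyRange_one]
      omega
    unfold solution solution_alt
    dsimp only
    rw [PySem.List.combinations_eq_nil_of_length_lt _ hlt, dfsB.eq_def]
    dsimp only
    simp only [List.foldl_nil, List.length_map, PySem.List.length_pyRange_one]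
    rw [if_pos (by push_cast; omega)]
  case pos =>
  unfold solution solution_alt
  have hr0 : (0 : Int) ≤ (((q.headD []).length : Nat) : Int) := by positivity
  have hs : ∀ xs : List Int,
      PySem.List.slice xs none (some (((q.headD []).length : Nat) : Int))
        = xs.take (q.headD []).length := fun xs => by
    rw [PySem.List.slice_to xs hr0]; simp
  simp only [hs, PySem.List.count_eq]
  rw [← List.map_const']
  rw [dfsB_eq q ans (q.headD []).length (PySem.List.pyRange 1 (n + 1)) (q.headD []).length
    (fun _ => 0) 0, zero_add]
  have houter : ∀ element : List Int,
      (PySem.List.pyRange 0 (q.length : Int)).foldl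
        (fun temp i =>
          temp ++ [(PySem.List.pyRange 0 (((q.headD []).length : Nat) : Int)).foldl
            (fun cnt j =>
              if element.contains (PySem.List.pyGetD (PySem.List.pyGetD q i []) j 0)
              then cnt + 1 else cnt) (0 : Int)]) []
      = q.map (fun row => (PySem.List.pyRange 0 (((q.headD []).length : Nat) : Int)).foldl
            (fun cnt j =>
              if element.contains (PySem.List.pyGetD row j 0)
              then cnt + 1 else cnt) (0 : Int)) := fun element => by
    rw [PySem.List.foldl_pyRange_zero_pyGetD' q []
      (fun temp row => temp ++ [(PySem.List.pyRange 0 (((q.headD []).length : Nat) : Int)).foldl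
        (fun cnt j =>
          if element.contains (PySem.List.pyGetD row j 0) then cnt + 1 else cnt) (0 : Int)]) []]
    rw [PySem.List.foldl_append_singleton_eq_map]
    simp
  simp only [houter]
  rw [PySem.List.foldl_ite_add_one, zero_add]
  congr 1
  apply List.countP_congr
  intro S hSmem
  have hS : S.Nodup :=
    (PySem.List.sublist_of_mem_combinations hSmem).nodup (PySem.List.nodup_pyRange_one 1 (n + 1))
  simp only [decide_eq_true_eq]
  have hmap : q.map (fun row => (PySem.List.pyRange 0 (((q.headD []).length : Nat) : Int)).foldl
        (fun cnt j =>
          if S.contains (PySem.List.pyGetD row j 0) then cnt + 1 else cnt) (0 : Int))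
      = q.map (fun row => (fun _ : List Int => (0 : Int)) row +
          (S.map (fun v => ((((row.take ((q.headD []).length)).count v : Nat)) : Int))).sum) := by
    apply List.map_congr_left
    intro row hrow
    rw [innerA_eq ((q.headD []).length) S row hS (hlen' row hrow)]
    ring
  rw [hmap]
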